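-- pv_equiv track=rewrite | github.com/hamzaplojovic/godel-rwkv | main.py | _heuristic_label
-- ===== SOURCE A (Python) =====
-- def _heuristic_label(actions: list[tuple[str, str]]) -> int:
--     """1 if last Bash action looks like a commit/push, else 0."""
--     for tool, target in reversed(actions):
--         if tool == "Bash":
--             t = target.lower()
--             if "git commit" in t or "git push" in t:
--                 return 1
--             return 0
--     return 0
-- ===== SOURCE B (Python) =====
-- def _heuristic_label(actions: list[tuple[str, str]]) -> int:
--     """1 if last Bash action looks like a commit/push, else 0."""
--     labels = [
--         1 if ("git commit" in t.lower() or "git push" in t.lower()) else 0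
--         for tool, t in actions
--         if tool == "Bash"
--     ]
--     return labels[-1] if labels else 0
-- ===== Notes on version B (the rewrite author's own statement) =====
-- stated objective: alternative
-- what changed: Instead of searching for the last Bash action and classifying only it, B maps every Bash action to its 0/1 label in one comprehension and then selects the last label (0 if none).
import Mathlib
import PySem

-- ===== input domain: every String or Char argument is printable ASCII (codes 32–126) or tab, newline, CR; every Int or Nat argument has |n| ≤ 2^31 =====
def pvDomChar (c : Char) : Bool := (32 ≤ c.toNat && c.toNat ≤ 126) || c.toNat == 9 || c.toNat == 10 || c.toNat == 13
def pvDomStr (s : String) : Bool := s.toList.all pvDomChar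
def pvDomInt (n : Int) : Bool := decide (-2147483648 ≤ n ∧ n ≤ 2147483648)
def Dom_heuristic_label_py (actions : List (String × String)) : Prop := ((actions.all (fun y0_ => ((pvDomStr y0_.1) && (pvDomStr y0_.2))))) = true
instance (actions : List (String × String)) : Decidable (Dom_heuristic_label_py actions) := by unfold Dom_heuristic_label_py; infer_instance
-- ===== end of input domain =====

-- B replaces A's reverse search for the last Bash action by a comprehension that labels every
-- Bash action and then selects the last label (alternative decomposition, same asymptotic cost).

-- ===== PORT A =====
-- 'for tool, target in reversed(actions): …' — structural recursion on the reversed list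
def pvAgo (l : List (String × String)) : Int :=
  match l with
  | [] => 0
  | (tool, target) :: rest =>
    if tool == "Bash" then
      let t := PySem.Str.lower target
      if PySem.Str.isIn "git commit" t || PySem.Str.isIn "git push" t then 1 else 0
    else pvAgo rest

def heuristic_label_py (actions : List (String × String)) : Int :=
  pvAgo actions.reverse

-- ===== PORT B =====
-- one element of the comprehension: the 0/1 label of a Bash target
def pvLabel (t : String) : Int :=
  if PySem.Str.isIn "git commit" (PySem.Str.lower t) || PySem.Str.isIn "git push" (PySem.Str.lower t)
  then 1 else 0

def heuristic_label_py_alt (actions : List (String × String)) : Int :=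
  let labels : List Int :=
    actions.filterMap (fun p => if p.1 == "Bash" then some (pvLabel p.2) else none)
  match labels.getLast? with   -- labels[-1] if labels else 0
  | some v => v
  | none => 0

-- ===== PRECONDITION & SPEC =====
def Spec_heuristic_label_py (actions : List (String × String)) (out : Int) : Prop := out = heuristic_label_py_alt actions
instance (actions : List (String × String)) (out : Int) : Decidable (Spec_heuristic_label_py actions out) := by unfold Spec_heuristic_label_py; infer_instance

-- ===== CLAIM (what is proved, stated in full; the proofs are below) =====
def Claim_equal_heuristic_label_py : Prop := ∀ (actions : List (String × String)), Dom_heuristic_label_py actions → Spec_heuristic_label_py actions (heuristic_label_py actions)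

-- ===== LEMMAS AND PROOFS =====

-- A's reverse scan returns the head of the label list of its argument (default 0)
theorem pvAgo_eq_headD (m : List (String × String)) :
    pvAgo m
      = (m.filterMap (fun p => if p.1 == "Bash" then some (pvLabel p.2) else none)).headD 0 := by
  induction m with
  | nil => rfl
  | cons x rest ih =>
    rcases x with ⟨tool, target⟩
    simp only [pvAgo, List.filterMap_cons]
    by_cases h : (tool == "Bash") = true
    · rw [if_pos h, if_pos h, List.headD_cons]
      rfl
    · rw [if_neg h, if_neg h]
      exact ih

theorem pv_getD_match (o : Option Int) : (match o with | some v => v | none => 0) = o.getD 0 := by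
  cases o <;> rfl

-- B's tail 'labels[-1] if labels else 0' is the getD of the last label
theorem pv_alt_eq (l : List (String × String)) :
    heuristic_label_py_alt l
      = ((l.filterMap (fun p => if p.1 == "Bash" then some (pvLabel p.2) else none)).getLast?).getD 0 := by
  unfold heuristic_label_py_alt
  exact pv_getD_match _

-- ===== VERDICT (by name: the statement is the Claim_ definition above) =====
theorem heuristic_label_py_spec : Claim_equal_heuristic_label_py := by
  intro actions _
  show pvAgo actions.reverse = heuristic_label_py_alt actions
  rw [pvAgo_eq_headD, List.filterMap_reverse, List.headD_eq_head?_getD, List.head?_reverse, pv_alt_eq]
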